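-- pv_equiv track=rewrite | github.com/JaviMaligno/ShowCode | Cipher Error/solution.py | split_string_on_change
-- ===== SOURCE A (Python) =====
-- def split_string_on_change(CipherString):
--     # Your code goes here
--     if not CipherString:
--         return CipherString
--
--     current_char=CipherString[0]
--     current_string=''
--
--     for i in CipherString:
--
--         if i==current_char:
--             current_string+=current_char#next(iter_string)
--         else:
--             current_char=i
--             current_string+=' ,'+current_char#next(iter_string)
--
--
--     return current_string+' '
-- ===== SOURCE B (Python) =====
-- def split_string_on_change(CipherString):
--     if not CipherString:
--         return CipherString
--     runs = []
--     start = 0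
--     n = len(CipherString)
--     while start < n:
--         end = start + 1
--         while end < n and CipherString[end] == CipherString[start]:
--             end += 1
--         runs.append(CipherString[start:end])
--         start = end
--     return ' ,'.join(runs) + ' '
-- ===== Notes on version B (the rewrite author's own statement) =====
-- stated objective: alternative
-- what changed: Replaces A's single pass that mutates a string accumulator character-by-character with a last-seen char by a run decomposition: a two-level index scan peels off each maximal run as a slice into a list of runs, which is then joined once with the separator and a trailing space.
import Mathlib
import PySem

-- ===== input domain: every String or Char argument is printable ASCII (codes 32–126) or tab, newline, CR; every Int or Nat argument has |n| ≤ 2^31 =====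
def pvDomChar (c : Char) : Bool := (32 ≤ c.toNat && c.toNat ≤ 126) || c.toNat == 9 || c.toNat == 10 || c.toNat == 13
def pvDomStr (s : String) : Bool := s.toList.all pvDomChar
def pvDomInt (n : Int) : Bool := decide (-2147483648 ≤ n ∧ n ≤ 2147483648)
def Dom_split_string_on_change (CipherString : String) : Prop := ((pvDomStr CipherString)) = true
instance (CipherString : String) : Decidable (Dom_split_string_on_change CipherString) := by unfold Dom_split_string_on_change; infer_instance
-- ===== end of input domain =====

-- B peels off maximal runs recursively and joins them with ' ,' instead of A's
-- character-by-character accumulator pass; same cost, different decomposition (objective: alternative).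

-- ===== PORT A =====
-- the loop body: state = (current_char, current_string)
def pvStepA (st : Char × List Char) (i : Char) : Char × List Char :=
  if i == st.1 then (st.1, st.2 ++ [st.1])
  else (i, st.2 ++ (' ' :: ',' :: [i]))

def split_string_on_change (CipherString : String) : String :=
  if CipherString = "" then CipherString
  else
    let cs := CipherString.toList
    let current_char := cs.headI   -- CipherString[0]; exact: guard ensures nonempty
    let st := cs.foldl pvStepA (current_char, [])
    String.ofList (st.2 ++ [' '])

-- ===== PORT B =====
-- the inner while loop: run length beyond position start, scanned while s[end] == s[start]
def pvRunLen (c : Char) : List Char → Nat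
  | [] => 0
  | x :: xs => if x == c then 1 + pvRunLen c xs else 0

-- the outer while loop over start: peel the slice [start:end] off as one run, continue at end;
-- transcribed as recursion on the remaining suffix, collecting the list `runs`
def pvRuns : List Char → List (List Char)
  | [] => []
  | c :: rest =>
    let i := 1 + pvRunLen c rest
    (c :: rest).take i :: pvRuns ((c :: rest).drop i)
termination_by s => s.length
decreasing_by
  simp only [List.length_drop, List.length_cons]
  omega

def split_string_on_change_alt (CipherString : String) : String :=
  if CipherString = "" then CipherString
  else  -- ' ,'.join(runs) ported as List.intercalate
    String.ofList (List.intercalate [' ', ','] (pvRuns CipherString.toList) ++ [' '])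

-- ===== PRECONDITION & SPEC =====
def Spec_split_string_on_change (CipherString : String) (out : String) : Prop := out = split_string_on_change_alt CipherString
instance (CipherString : String) (out : String) : Decidable (Spec_split_string_on_change CipherString out) := by unfold Spec_split_string_on_change; infer_instance

-- ===== CLAIM (what is proved, stated in full; the proofs are below) =====
def Claim_equal_split_string_on_change : Prop := ∀ (CipherString : String), Dom_split_string_on_change CipherString → Spec_split_string_on_change CipherString (split_string_on_change CipherString)

-- ===== LEMMAS AND PROOFS =====

-- the characters A's loop appends, as a function of the current_char and the remaining input
def pvInsA (cc : Char) : List Char → List Char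
  | [] => []
  | x :: xs => (if x == cc then [cc] else (' ' :: ',' :: [x])) ++ pvInsA (if x == cc then cc else x) xs

theorem pvFoldA (l : List Char) (cc : Char) (acc : List Char) :
    (l.foldl pvStepA (cc, acc)).2 = acc ++ pvInsA cc l := by
  induction l generalizing cc acc with
  | nil => simp [pvInsA]
  | cons x xs ih =>
    by_cases h : x == cc <;>
      simp [pvStepA, pvInsA, h, ih, List.append_assoc]

theorem pvIntercalateConsHead (sep r : List Char) (x : Char) (ls : List (List Char)) :
    List.intercalate sep ((x :: r) :: ls) = x :: List.intercalate sep (r :: ls) := by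
  cases ls with
  | nil => simp [List.intercalate]
  | cons b ls => simp [List.intercalate, List.intersperse]

theorem pvIntercalateConsCons (sep a b : List Char) (ls : List (List Char)) :
    List.intercalate sep (a :: b :: ls) = a ++ sep ++ List.intercalate sep (b :: ls) := by
  simp [List.intercalate, List.intersperse, List.append_assoc]

theorem pvRunsUnfold (x : Char) (xs : List Char) :
    pvRuns (x :: xs) = (x :: xs).take (1 + pvRunLen x xs) :: pvRuns ((x :: xs).drop (1 + pvRunLen x xs)) := by
  conv_lhs => rw [pvRuns]

theorem pvRunsEq (xs : List Char) (c : Char) :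
    c :: pvInsA c xs = List.intercalate [' ', ','] (pvRuns (c :: xs)) := by
  induction xs generalizing c with
  | nil => simp [pvInsA, pvRuns, pvRunLen, List.intercalate]
  | cons x xs ih =>
    by_cases h : x = c
    · subst h
      have hx : (x == x) = true := by simp
      have key : pvRuns (x :: x :: xs) =
          (x :: (x :: xs).take (1 + pvRunLen x xs)) :: pvRuns ((x :: xs).drop (1 + pvRunLen x xs)) := by
        conv_lhs => rw [pvRuns]
        simp only [pvRunLen, hx, if_true]
        have e : 1 + (1 + pvRunLen x xs) = (1 + pvRunLen x xs) + 1 := by omega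
        rw [e, List.take_succ_cons, List.drop_succ_cons]
      rw [key, pvIntercalateConsHead, ← pvRunsUnfold, ← ih x]
      simp [pvInsA]
    · have hx : (x == c) = false := by simp [h]
      have key : pvRuns (c :: x :: xs) = [c] :: pvRuns (x :: xs) := by
        conv_lhs => rw [pvRuns]
        simp [pvRunLen, hx]
      rw [key, pvRunsUnfold x xs, pvIntercalateConsCons, ← pvRunsUnfold, ← ih x]
      simp [pvInsA, hx]

theorem split_eq (s : String) :
    split_string_on_change s = split_string_on_change_alt s := by
  by_cases hs : s = ""
  · simp [split_string_on_change, split_string_on_change_alt, hs]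
  · have hne : s.toList ≠ [] := by simpa using hs
    obtain ⟨c, rest, hcr⟩ := List.exists_cons_of_ne_nil hne
    simp only [split_string_on_change, split_string_on_change_alt, hs, if_false, hcr]
    have h1 : ((c :: rest).foldl pvStepA ((c :: rest).headI, [])).2
        = pvInsA c (c :: rest) := by
      rw [pvFoldA]; simp
    rw [h1]
    have h2 : pvInsA c (c :: rest) = c :: pvInsA c rest := by
      simp [pvInsA]
    rw [h2, pvRunsEq]

-- ===== VERDICT (by name: the statement is the Claim_ definition above) =====
theorem split_string_on_change_spec : Claim_equal_split_string_on_change := by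
  intro s _
  unfold Spec_split_string_on_change
  exact split_eq s
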